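-- pv_equiv track=rewrite | github.com/bloodlemon2/crane_x7_vla | ros2/src/crane_x7_vla/crane_x7_vla/utils/paths.py | is_huggingface_hub_id
-- ===== SOURCE A (Python) =====
-- def is_huggingface_hub_id(path: str) -> bool:
--     """Check if path looks like a HuggingFace Hub model ID.
--
--     Args:
--         path: Path string to check
--
--     Returns:
--         True if path looks like a HF Hub ID (e.g., 'username/model-name')
--     """
--     if not path:
--         return False
--     if path.startswith('/') or path.startswith('./') or path.startswith('..'):
--         return False
--     if '\\' in path:  # Windows path
--         return False
--     parts = path.split('/')
--     return len(parts) == 2 and all(p for p in parts)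
-- ===== SOURCE B (Python) =====
-- def is_huggingface_hub_id(path: str) -> bool:
--     """Single left-to-right scan: track the one allowed separator and whether both
--     sides are nonempty, instead of guard chain + split."""
--     if path.startswith('./') or path.startswith('..'):
--         return False
--     seen = False
--     pre = post = 0
--     for c in path:
--         if c == '\\':
--             return False
--         if c == '/':
--             if seen:
--                 return False
--             seen = True
--         elif seen:
--             post += 1
--         else:
--             pre += 1
--     return seen and pre > 0 and post > 0
-- ===== Notes on version B (the rewrite author's own statement) =====
-- stated objective: alternative
-- what changed: Replaces A's guard chain plus split('/') and list test by a single left-to-right character scan that tracks the one allowed slash and the emptiness of both sides, with no intermediate list.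
import Mathlib
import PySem

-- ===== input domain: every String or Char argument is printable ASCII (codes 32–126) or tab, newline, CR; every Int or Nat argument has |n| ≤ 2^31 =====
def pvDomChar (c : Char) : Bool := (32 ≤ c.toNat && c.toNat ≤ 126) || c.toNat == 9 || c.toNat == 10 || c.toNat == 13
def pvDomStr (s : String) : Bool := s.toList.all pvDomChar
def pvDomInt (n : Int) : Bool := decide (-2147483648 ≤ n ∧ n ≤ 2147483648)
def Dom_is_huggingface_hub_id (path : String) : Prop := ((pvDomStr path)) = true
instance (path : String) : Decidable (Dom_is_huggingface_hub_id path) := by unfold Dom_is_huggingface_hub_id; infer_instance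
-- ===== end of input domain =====

-- B replaces A's guard chain + split('/') by a single left-to-right scan; objective: alternative (same cost, one pass, no intermediate list).

-- ===== PORT A =====
def is_huggingface_hub_id (path : String) : Bool :=
  if path.toList.isEmpty then false
  else if PySem.Str.startswith path "/" || PySem.Str.startswith path "./" || PySem.Str.startswith path ".." then false
  else if PySem.Str.isIn "\\" path then false
  else
    match PySem.Str.split? path "/" with
    | some parts => decide (parts.length = 2) && parts.all (fun p => !p.toList.isEmpty)
    | none => false   -- unreachable: the separator "/" is nonempty

-- ===== PORT B =====
-- the for-loop of Source B: state (seen, pre, post), early `return False` = false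
def hubScan : List Char → Bool → Nat → Nat → Bool
  | [], seen, pre, post => seen && decide (0 < pre) && decide (0 < post)
  | c :: rest, seen, pre, post =>
    if c = '\\' then false
    else if c = '/' then
      if seen then false else hubScan rest true pre post
    else if seen then hubScan rest seen pre (post + 1)
    else hubScan rest seen (pre + 1) post

def is_huggingface_hub_id_alt (path : String) : Bool :=
  if PySem.Str.startswith path "./" || PySem.Str.startswith path ".." then false
  else hubScan path.toList false 0 0

-- ===== PRECONDITION & SPEC =====
def Spec_is_huggingface_hub_id (path : String) (out : Bool) : Prop := out = is_huggingface_hub_id_alt path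
instance (path : String) (out : Bool) : Decidable (Spec_is_huggingface_hub_id path out) := by unfold Spec_is_huggingface_hub_id; infer_instance

-- ===== CLAIM (what is proved, stated in full; the proofs are below) =====
def Claim_equal_is_huggingface_hub_id : Prop := ∀ (path : String), Dom_is_huggingface_hub_id path → Spec_is_huggingface_hub_id path (is_huggingface_hub_id path)

-- ===== LEMMAS AND PROOFS =====

-- simple recursive form of split-on-'/'
def splitSimple : List Char → List Char → List (List Char)
  | [], cur => [cur.reverse]
  | c :: rest, cur => if c = '/' then cur.reverse :: splitSimple rest [] else splitSimple rest (c :: cur)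

theorem splitSimple_ne_nil (l cur : List Char) : splitSimple l cur ≠ [] := by
  induction l generalizing cur with
  | nil => simp [splitSimple]
  | cons c rest ih => simp only [splitSimple]; split <;> simp_all

theorem splitOn_go_eq (l : List Char) : ∀ (fuel : Nat) (cur : List Char) (acc : List (List Char)),
    l.length < fuel →
    PySem.Chars.splitOn.go ['/'] fuel l cur acc = acc.reverse ++ splitSimple l cur := by
  induction l with
  | nil =>
    intro fuel cur acc h
    match fuel with
    | fuel + 1 => simp [PySem.Chars.splitOn.go, splitSimple]
  | cons c rest ih =>
    intro fuel cur acc h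
    match fuel with
    | fuel + 1 =>
      rw [PySem.Chars.splitOn.go]
      by_cases hc : c = '/'
      · subst hc
        rw [if_pos (by simp)]
        rw [show List.drop (['/'] : List Char).length ('/' :: rest) = rest from rfl]
        rw [ih fuel [] (cur.reverse :: acc) (Nat.lt_of_succ_lt_succ h)]
        simp [splitSimple]
      · rw [if_neg (by
          simp [List.isPrefixOf_iff_prefix, List.cons_prefix_cons]
          exact fun h => hc h.symm)]
        rw [ih fuel (c :: cur) acc (Nat.lt_of_succ_lt_succ h)]
        simp [splitSimple, hc]

theorem splitOn_eq_splitSimple (l : List Char) :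
    PySem.Chars.splitOn l ['/'] = splitSimple l [] := by
  have := splitOn_go_eq l (l.length + 1) [] [] (Nat.lt_succ_self _)
  simpa [PySem.Chars.splitOn] using this

-- the "tail after the slash" state of the scan
theorem hubScan_seen (l : List Char) : ∀ (cur : List Char) (pre : Nat),
    hubScan l true pre cur.length =
      (decide ('\\' ∉ l) && decide (0 < pre) &&
        ((splitSimple l cur).length == 1 && (splitSimple l cur).all (fun p => !p.isEmpty))) := by
  induction l with
  | nil =>
    intro cur pre
    cases cur <;> simp [hubScan, splitSimple]
  | cons c rest ih =>
    intro cur pre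
    by_cases hb : c = '\\'
    · subst hb; simp [hubScan]
    · by_cases hc : c = '/'
      · subst hc
        rcases hsp : splitSimple rest [] with _ | ⟨a, t⟩
        · exact absurd hsp (splitSimple_ne_nil rest [])
        · simp [hubScan, splitSimple, hsp]
      · have : hubScan (c :: rest) true pre cur.length = hubScan rest true pre (c :: cur).length := by
          simp [hubScan, hb, hc]
        rw [this, ih (c :: cur) pre]
        simp [splitSimple, hc, show ¬('\\' : Char) = c from fun h => hb h.symm]

-- the "before the slash" state of the scan
theorem hubScan_unseen (l : List Char) : ∀ (cur : List Char),
    hubScan l false cur.length 0 =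
      (decide ('\\' ∉ l) &&
        ((splitSimple l cur).length == 2 && (splitSimple l cur).all (fun p => !p.isEmpty))) := by
  induction l with
  | nil =>
    intro cur
    simp [hubScan, splitSimple]
  | cons c rest ih =>
    intro cur
    by_cases hb : c = '\\'
    · subst hb; simp [hubScan]
    · by_cases hc : c = '/'
      · subst hc
        have : hubScan ('/' :: rest) false cur.length 0 = hubScan rest true cur.length 0 := by
          simp [hubScan]
        rw [this]
        have h2 := hubScan_seen rest ([] : List Char) cur.length
        simp only [List.length_nil] at h2
        rw [h2]
        cases cur with
        | nil => simp [splitSimple]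
        | cons d ds =>
          simp [splitSimple, Bool.and_left_comm, Bool.and_comm]
      · have : hubScan (c :: rest) false cur.length 0 = hubScan rest false (c :: cur).length 0 := by
          simp [hubScan, hb, hc]
        rw [this, ih (c :: cur)]
        simp [splitSimple, hc, show ¬('\\' : Char) = c from fun h => hb h.symm]

theorem hubScan_top (l : List Char) :
    hubScan l false 0 0 =
      (decide ('\\' ∉ l) &&
        ((splitSimple l []).length == 2 && (splitSimple l []).all (fun p => !p.isEmpty))) := by
  simpa using hubScan_unseen l []

-- ===== VERDICT (by name: the statement is the Claim_ definition above) =====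
theorem is_huggingface_hub_id_spec : Claim_equal_is_huggingface_hub_id := by
  intro path _
  unfold Spec_is_huggingface_hub_id is_huggingface_hub_id is_huggingface_hub_id_alt
  by_cases hpre : (PySem.Str.startswith path "./" || PySem.Str.startswith path ".." : Bool) = true
  · -- both sides take their prefix guards
    rw [if_pos hpre]
    have hA : (PySem.Str.startswith path "/" || PySem.Str.startswith path "./" || PySem.Str.startswith path ".." : Bool) = true := by
      rcases Bool.or_eq_true_iff.mp hpre with h | h
      · exact Bool.or_eq_true_iff.mpr (Or.inl (Bool.or_eq_true_iff.mpr (Or.inr h)))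
      · exact Bool.or_eq_true_iff.mpr (Or.inr h)
    rw [if_neg, if_pos hA]
    · intro h
      rw [List.isEmpty_iff] at h
      rcases Bool.or_eq_true_iff.mp hpre with hh | hh <;>
      · simp only [PySem.Str.startswith_eq] at hh
        rw [PySem.Chars.startswith_iff, h] at hh
        simpa using hh.length_le
  · rw [if_neg hpre]
    rw [hubScan_top path.toList]
    rw [Bool.or_eq_true_iff] at hpre
    replace hpre := not_or.mp hpre
    by_cases hnil : path.toList.isEmpty
    · rw [if_pos hnil]
      rw [List.isEmpty_iff] at hnil
      simp [hnil, splitSimple]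
    · rw [if_neg hnil]
      by_cases hsl : PySem.Str.startswith path "/" = true
      · -- A's leading-'/' guard fires; B's scan also rejects (empty first part)
        rw [if_pos (Bool.or_eq_true_iff.mpr (Or.inl (Bool.or_eq_true_iff.mpr (Or.inl hsl))))]
        simp only [PySem.Str.startswith_eq] at hsl
        rw [PySem.Chars.startswith_iff] at hsl
        obtain ⟨t, ht⟩ := hsl
        rw [show ("/".toList : List Char) = ['/'] from rfl] at ht
        rw [← ht]
        simp [splitSimple]
      · have hg : ¬ ((PySem.Str.startswith path "/" || PySem.Str.startswith path "./" || PySem.Str.startswith path "..") = true) := by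
          intro h
          rcases Bool.or_eq_true_iff.mp h with h | h
          · rcases Bool.or_eq_true_iff.mp h with h | h
            · exact hsl h
            · exact hpre.1 h
          · exact hpre.2 h
        rw [if_neg hg]
        by_cases hbs : PySem.Str.isIn "\\" path = true
        · -- backslash present: both sides reject
          have hmem : '\\' ∈ path.toList := by
            rw [PySem.Str.isIn_iff_infix] at hbs
            simpa [List.singleton_infix_iff] using hbs
          rw [if_pos hbs]
          simp [hmem]
        · -- main case: no guard fires; both compute the split test
          rw [if_neg hbs]
          have hnb : '\\' ∉ path.toList := by
            intro hmem
            apply hbs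
            rw [PySem.Str.isIn_iff_infix]
            simpa [List.singleton_infix_iff] using hmem
          rw [PySem.Str.split?]
          simp only [PySem.Chars.split?]
          rw [if_neg (by simp)]
          rw [show ("/".toList : List Char) = ['/'] from rfl, splitOn_eq_splitSimple]
          simp [hnb, List.all_eq, Bool.beq_eq_decide_eq]
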